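-- pv_equiv track=rewrite | github.com/bberryw31/leetcode-python | 2348-number-of-zero-filled-subarrays/2348-number-of-zero-filled-subarrays.py | zeroFilledSubarray
-- ===== SOURCE A (Python) =====
-- from typing import List
--
-- def zeroFilledSubarray(nums: List[int]) -> int:
--     res = 0
--     temp = 0
--     for num in nums:
--         if num == 0:
--             temp += 1
--         else:
--             for i in range(1, temp + 1):
--                 res += i
--             temp = 0
--     if temp:
--         for i in range(1, temp + 1):
--                 res += i
--     return res
-- ===== SOURCE B (Python) =====
-- def zeroFilledSubarray(nums):
--     # one pass: add the length of the current zero-run ending at each index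
--     res = 0
--     run = 0
--     for num in nums:
--         run = run + 1 if num == 0 else 0
--         res += run
--     return res
-- ===== Notes on version B (the rewrite author's own statement) =====
-- stated objective: faster
-- what changed: Replaced A's inner summation loop over each zero-run (re-summed at every run boundary) by a single pass that adds the length of the zero-run ending at each index, removing the nested loop.
import Mathlib
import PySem

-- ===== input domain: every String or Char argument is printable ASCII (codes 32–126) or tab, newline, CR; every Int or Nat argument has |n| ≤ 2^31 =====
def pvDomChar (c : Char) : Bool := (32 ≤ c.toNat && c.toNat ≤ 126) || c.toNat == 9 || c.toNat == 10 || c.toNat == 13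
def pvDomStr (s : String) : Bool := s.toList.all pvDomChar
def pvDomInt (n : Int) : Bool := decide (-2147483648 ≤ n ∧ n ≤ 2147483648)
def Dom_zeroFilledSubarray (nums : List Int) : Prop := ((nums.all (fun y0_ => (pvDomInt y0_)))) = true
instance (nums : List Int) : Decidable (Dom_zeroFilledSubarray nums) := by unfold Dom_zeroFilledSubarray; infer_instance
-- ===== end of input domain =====

-- B replaces A's nested per-run summation loop with a single pass adding the current zero-run length at each element (O(n) instead of O(n^2)).


-- ===== PORT A =====
-- step of A's outer loop: on a nonzero element, the inner `for i in range(1, temp+1)` sums into res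
def zfsA_step (st : Int × Int) (num : Int) : Int × Int :=
  if num == 0 then (st.1, st.2 + 1)
  else ((PySem.List.pyRange 1 (st.2 + 1) 1).foldl (· + ·) st.1, 0)

def zeroFilledSubarray (nums : List Int) : Int :=
  let st := nums.foldl zfsA_step (0, 0)
  if st.2 ≠ 0 then (PySem.List.pyRange 1 (st.2 + 1) 1).foldl (· + ·) st.1 else st.1

-- ===== PORT B =====
def zfsB_step (st : Int × Int) (num : Int) : Int × Int :=
  let run := if num == 0 then st.2 + 1 else 0
  (st.1 + run, run)

def zeroFilledSubarray_alt (nums : List Int) : Int :=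
  (nums.foldl zfsB_step (0, 0)).1

-- ===== PRECONDITION & SPEC =====
def Spec_zeroFilledSubarray (nums : List Int) (out : Int) : Prop := out = zeroFilledSubarray_alt nums
instance (nums : List Int) (out : Int) : Decidable (Spec_zeroFilledSubarray nums out) := by unfold Spec_zeroFilledSubarray; infer_instance

-- ===== CLAIM (what is proved, stated in full; the proofs are below) =====
def Claim_equal_zeroFilledSubarray : Prop := ∀ (nums : List Int), Dom_zeroFilledSubarray nums → Spec_zeroFilledSubarray nums (zeroFilledSubarray nums)

-- ===== LEMMAS AND PROOFS =====

-- sum of range(1, t+1) starting from r, appended one more term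
theorem zfs_range_sum_succ (r t : Int) (ht : 0 ≤ t) :
    (PySem.List.pyRange 1 (t + 1 + 1) 1).foldl (· + ·) r
      = (PySem.List.pyRange 1 (t + 1) 1).foldl (· + ·) r + (t + 1) := by
  rw [PySem.List.pyRange_one_succ_right (show (1:Int) ≤ t + 1 by omega)]
  simp

-- main invariant: running A from (r, t) and B from (sum_{1..t} + r, t) agree
theorem zfs_loop_agree (nums : List Int) (r t : Int) (ht : 0 ≤ t) :
    (let st := nums.foldl zfsA_step (r, t);
      if st.2 ≠ 0 then (PySem.List.pyRange 1 (st.2 + 1) 1).foldl (· + ·) st.1 else st.1)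
    = (nums.foldl zfsB_step ((PySem.List.pyRange 1 (t + 1) 1).foldl (· + ·) r, t)).1 := by
  induction nums generalizing r t with
  | nil =>
    simp only [List.foldl_nil]
    by_cases h : t = 0
    · subst h; simp [PySem.List.pyRange_one_eq_nil]
    · simp [h]
  | cons num rest ih =>
    simp only [List.foldl_cons]
    by_cases h : num = 0
    · have := ih r (t + 1) (by omega)
      rw [zfs_range_sum_succ r t ht] at this
      simpa [zfsA_step, zfsB_step, h] using this
    · have := ih ((PySem.List.pyRange 1 (t + 1) 1).foldl (· + ·) r) 0 le_rfl
      simpa [zfsA_step, zfsB_step, h] using this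

-- ===== VERDICT (by name: the statement is the Claim_ definition above) =====
theorem zeroFilledSubarray_spec : Claim_equal_zeroFilledSubarray := by
  intro nums _
  unfold Spec_zeroFilledSubarray zeroFilledSubarray zeroFilledSubarray_alt
  have := zfs_loop_agree nums 0 0 le_rfl
  simpa [PySem.List.pyRange_one_eq_nil] using this
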